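-- pv_equiv track=rewrite | github.com/StonyBrookNLP/tellmewhy | src/automatic_evaluation.py | to_multiset
-- ===== SOURCE A (Python) =====
-- def to_multiset(x):
--     result = set()
--     max_rep = len(x)
--     for elt in x:
--         for n in range(max_rep):
--             n_elt = (elt,n)
--             if n_elt not in result:
--                 result.add(n_elt)
--                 break
--     return result
-- ===== SOURCE B (Python) =====
-- def to_multiset(x):
--     result = set()
--     seen = {}
--     for elt in x:
--         k = seen.get(elt, 0)
--         result.add((elt, k))
--         seen[elt] = k + 1
--     return result
-- ===== Notes on version B (the rewrite author's own statement) =====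
-- stated objective: faster
-- what changed: Replaces A's per-element probe loop over range(len(x)) searching for the first free occurrence index with a single pass that maintains a per-element occurrence counter in a dict, so the inner scan disappears.
import Mathlib
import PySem

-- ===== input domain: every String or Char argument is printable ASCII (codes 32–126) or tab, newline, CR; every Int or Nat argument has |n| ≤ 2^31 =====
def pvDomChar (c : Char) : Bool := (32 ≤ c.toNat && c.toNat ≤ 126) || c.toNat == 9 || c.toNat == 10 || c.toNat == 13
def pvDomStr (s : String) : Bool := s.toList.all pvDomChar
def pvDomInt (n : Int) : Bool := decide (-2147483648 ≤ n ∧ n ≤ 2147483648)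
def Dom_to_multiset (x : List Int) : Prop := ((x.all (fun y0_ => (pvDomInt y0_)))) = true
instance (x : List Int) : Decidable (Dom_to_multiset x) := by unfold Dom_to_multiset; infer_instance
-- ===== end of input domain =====

-- B replaces A's inner probe loop over range(len(x)) with a per-element occurrence
-- counter maintained in a dict: one pass, no inner scan (faster on duplicate-heavy input).

-- ===== PORT A =====
-- inner loop 'for n in range(max_rep): if (elt,n) not in result: result.add((elt,n)); break'
def pvProbeA (result : PySem.Set (Int × Int)) (elt : Int) : List Int → PySem.Set (Int × Int)
  | [] => result
  | n :: ns =>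
    if PySem.Set.contains result (elt, n) then pvProbeA result elt ns
    else PySem.Set.add result (elt, n)

def to_multiset (x : List Int) : List (Int × Int) :=
  x.foldl (fun result elt => pvProbeA result elt (PySem.List.pyRange 0 (PySem.List.len x) 1))
    PySem.Set.empty

-- ===== PORT B =====
def to_multiset_alt (x : List Int) : List (Int × Int) :=
  (x.foldl
    (fun (st : PySem.Set (Int × Int) × PySem.Dict Int Int) elt =>
      let k := st.2.getD elt 0
      (PySem.Set.add st.1 (elt, k), st.2.insert elt (k + 1)))
    (PySem.Set.empty, PySem.Dict.empty)).1

-- ===== PRECONDITION & SPEC =====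
def Spec_to_multiset (x : List Int) (out : List (Int × Int)) : Prop := out = to_multiset_alt x
instance (x : List Int) (out : List (Int × Int)) : Decidable (Spec_to_multiset x out) := by unfold Spec_to_multiset; infer_instance

-- ===== CLAIM (what is proved, stated in full; the proofs are below) =====
def Claim_equal_to_multiset : Prop := ∀ (x : List Int), Dom_to_multiset x → Spec_to_multiset x (to_multiset x)

-- ===== LEMMAS AND PROOFS =====

-- The probe finds the first index not already present: if every n ∈ l₁ is paired
-- with elt in R and (elt,k) is not, the probe over l₁ ++ k :: l₂ adds (elt,k).
lemma pvProbeA_first (R : PySem.Set (Int × Int)) (e k : Int) (l₁ l₂ : List Int)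
    (hin : ∀ n ∈ l₁, (e, n) ∈ R) (hout : (e, k) ∉ R) :
    pvProbeA R e (l₁ ++ k :: l₂) = PySem.Set.add R (e, k) := by
  induction l₁ with
  | nil =>
    simp only [List.nil_append, pvProbeA]
    rw [if_neg]
    simp [PySem.Set.contains]
    exact hout
  | cons n ns ih =>
    simp only [List.cons_append, pvProbeA]
    rw [if_pos]
    · exact ih (fun m hm => hin m (List.mem_cons_of_mem _ hm))
    · simp [PySem.Set.contains]
      exact hin n (List.mem_cons_self ..)

lemma pvProbeA_range (R : PySem.Set (Int × Int)) (e k m : Int)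
    (hk0 : 0 ≤ k) (hkm : k < m)
    (hin : ∀ n : Int, 0 ≤ n → n < k → (e, n) ∈ R) (hout : (e, k) ∉ R) :
    pvProbeA R e (PySem.List.pyRange 0 m 1) = PySem.Set.add R (e, k) := by
  rw [PySem.List.pyRange_one_append 0 k m hk0 (le_of_lt hkm),
      PySem.List.pyRange_one_cons hkm]
  exact pvProbeA_first R e k _ _
    (fun n hn => by
      rw [PySem.List.mem_pyRange_one] at hn
      exact hin n hn.1 hn.2) hout

-- Joint loop invariant: running A's fold and B's fold from matched states gives
-- the same set, provided R's members with first component e are exactly the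
-- pairs (e, n) with 0 ≤ n < d.getD e 0, and every counter leaves room for the
-- remaining elements below m.
lemma pv_loops_eq (rest : List Int) (R : PySem.Set (Int × Int)) (d : PySem.Dict Int Int) (m : Int)
    (hmem : ∀ (e n : Int), (e, n) ∈ R ↔ 0 ≤ n ∧ n < d.getD e 0)
    (hpos : ∀ e : Int, 0 ≤ d.getD e 0)
    (hbound : ∀ e : Int, d.getD e 0 + rest.length ≤ m) :
    rest.foldl (fun result elt => pvProbeA result elt (PySem.List.pyRange 0 m 1)) R
    = (rest.foldl
        (fun (st : PySem.Set (Int × Int) × PySem.Dict Int Int) elt =>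
          let k := st.2.getD elt 0
          (PySem.Set.add st.1 (elt, k), st.2.insert elt (k + 1)))
        (R, d)).1 := by
  induction rest generalizing R d with
  | nil => simp
  | cons e es ih =>
    have hk0 : 0 ≤ d.getD e 0 := hpos e
    have hkm : d.getD e 0 < m := by
      have := hbound e
      simp only [List.length_cons] at this
      push_cast at this
      omega
    have hout : (e, d.getD e 0) ∉ R := by
      intro h
      have := (hmem e (d.getD e 0)).1 h
      omega
    simp only [List.foldl_cons]
    rw [pvProbeA_range R e (d.getD e 0) m hk0 hkm
        (fun n h0 hn => (hmem e n).2 ⟨h0, hn⟩) hout]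
    exact ih (PySem.Set.add R (e, d.getD e 0)) (d.insert e (d.getD e 0 + 1))
      (by
        intro e' n
        rw [PySem.Set.mem_add, PySem.Dict.getD_insert, hmem e' n]
        by_cases he : e' = e
        · subst he
          rw [if_pos rfl]
          simp only [Prod.mk.injEq, true_and]
          omega
        · rw [if_neg he]
          simp only [Prod.mk.injEq]
          constructor
          · rintro (h | ⟨rfl, rfl⟩)
            · exact h
            · exact absurd rfl he
          · exact Or.inl)
      (by
        intro e'
        rw [PySem.Dict.getD_insert]
        have := hpos e'
        split_ifs <;> omega)
      (by
        intro e'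
        rw [PySem.Dict.getD_insert]
        have h1 := hbound e'
        have h2 := hbound e
        simp only [List.length_cons] at h1 h2
        push_cast at h1 h2 ⊢
        split_ifs <;> omega)

-- ===== VERDICT (by name: the statement is the Claim_ definition above) =====
theorem to_multiset_spec : Claim_equal_to_multiset := by
  intro x _
  show to_multiset x = to_multiset_alt x
  unfold to_multiset to_multiset_alt
  rw [PySem.List.len_eq]
  exact pv_loops_eq x PySem.Set.empty PySem.Dict.empty (x.length : Int)
    (by intro e n; simp [PySem.Set.empty, PySem.Dict.getD_empty])
    (by intro e; simp [PySem.Dict.getD_empty])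
    (by intro e; simp [PySem.Dict.getD_empty])
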